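-- pv_equiv track=rewrite | github.com/Nicotero94/Parcial_Tecnicas_Programacion | Ejercicio 2.py | convertirMapaAMapaBooleano
-- ===== SOURCE A (Python) =====
-- def convertirMapaAMapaBooleano(mapa):
--
--     mapaBooleano = []
--
--     for linea in mapa:
--
--         filaBooleana = []
--
--         for letra in linea:
--             if letra == "b":
--                 filaBooleana.append(True)
--             elif letra == '.':
--                 filaBooleana.append(False)
--             else:
--                 return []
--
--         mapaBooleano.append(filaBooleana)
--
--     return mapaBooleano
-- ===== SOURCE B (Python) =====
-- def convertirMapaAMapaBooleano(mapa):
--     # Pass 1: validate the whole map; pass 2: build the boolean map.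
--     if not all(c in 'b.' for linea in mapa for c in linea):
--         return []
--     return [[c == 'b' for c in linea] for linea in mapa]
-- ===== Notes on version B (the rewrite author's own statement) =====
-- stated objective: idiomatic
-- what changed: Replaced the single convert-with-early-return loop by a separate whole-map validation pass followed by a nested comprehension that builds the result.
import Mathlib
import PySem

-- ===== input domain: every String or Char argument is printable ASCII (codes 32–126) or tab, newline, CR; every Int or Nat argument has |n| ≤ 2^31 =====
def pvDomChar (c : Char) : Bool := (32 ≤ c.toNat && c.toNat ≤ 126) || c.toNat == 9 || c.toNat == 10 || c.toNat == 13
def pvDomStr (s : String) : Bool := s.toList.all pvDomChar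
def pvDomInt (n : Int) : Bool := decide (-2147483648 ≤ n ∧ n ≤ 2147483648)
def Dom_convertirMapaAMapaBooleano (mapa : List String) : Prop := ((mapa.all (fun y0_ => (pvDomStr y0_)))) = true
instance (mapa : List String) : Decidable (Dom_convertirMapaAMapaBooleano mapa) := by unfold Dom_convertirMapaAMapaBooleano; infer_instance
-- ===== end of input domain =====

-- B replaces A's convert-with-early-return loop by a validate-everything pass plus a separate build pass (idiomatic two-pass decomposition; same cost).

-- ===== PORT A =====
-- inner loop over one line: appends True/False, 'return []' modelled as none
def pvRowA : List Char → List Bool → Option (List Bool)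
  | [], fila => some fila
  | c :: rest, fila =>
      if c == 'b' then pvRowA rest (fila ++ [true])
      else if c == '.' then pvRowA rest (fila ++ [false])
      else none

def pvRowsA : List String → List (List Bool) → List (List Bool)
  | [], acc => acc
  | l :: rest, acc =>
      match pvRowA l.toList [] with
      | none => []
      | some fila => pvRowsA rest (acc ++ [fila])

def convertirMapaAMapaBooleano (mapa : List String) : List (List Bool) :=
  pvRowsA mapa []

-- ===== PORT B =====
def convertirMapaAMapaBooleano_alt (mapa : List String) : List (List Bool) :=
  if mapa.all (fun linea => linea.toList.all (fun c => c == 'b' || c == '.')) then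
    mapa.map (fun linea => linea.toList.map (fun c => c == 'b'))
  else []

-- ===== PRECONDITION & SPEC =====
def Spec_convertirMapaAMapaBooleano (mapa : List String) (out : List (List Bool)) : Prop := out = convertirMapaAMapaBooleano_alt mapa
instance (mapa : List String) (out : List (List Bool)) : Decidable (Spec_convertirMapaAMapaBooleano mapa out) := by unfold Spec_convertirMapaAMapaBooleano; infer_instance

-- ===== CLAIM (what is proved, stated in full; the proofs are below) =====
def Claim_equal_convertirMapaAMapaBooleano : Prop := ∀ (mapa : List String), Dom_convertirMapaAMapaBooleano mapa → Spec_convertirMapaAMapaBooleano mapa (convertirMapaAMapaBooleano mapa)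

-- ===== LEMMAS AND PROOFS =====

theorem pvRowA_eq (cs : List Char) : ∀ fila : List Bool,
    pvRowA cs fila =
      if cs.all (fun c => c == 'b' || c == '.') then some (fila ++ cs.map (fun c => c == 'b'))
      else none := by
  induction cs with
  | nil => intro fila; simp [pvRowA]
  | cons c rest ih =>
      intro fila
      by_cases hb : c = 'b'
      · simp [pvRowA, hb, ih]
      · by_cases hd : c = '.'
        · subst hd
          simp [pvRowA, ih, List.all_cons]
        · simp [pvRowA, hb, hd, List.all_cons]

theorem pvRowsA_eq (ls : List String) : ∀ acc : List (List Bool),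
    pvRowsA ls acc =
      if ls.all (fun l => l.toList.all (fun c => c == 'b' || c == '.')) then
        acc ++ ls.map (fun l => l.toList.map (fun c => c == 'b'))
      else [] := by
  induction ls with
  | nil => intro acc; simp [pvRowsA]
  | cons l rest ih =>
      intro acc
      by_cases hl : l.toList.all (fun c => c == 'b' || c == '.')
      · simp [pvRowsA, pvRowA_eq, hl, ih, List.all_cons]
      · simp [pvRowsA, pvRowA_eq, hl, List.all_cons]

-- ===== VERDICT (by name: the statement is the Claim_ definition above) =====
theorem convertirMapaAMapaBooleano_spec : Claim_equal_convertirMapaAMapaBooleano := by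
  intro mapa _
  unfold Spec_convertirMapaAMapaBooleano convertirMapaAMapaBooleano convertirMapaAMapaBooleano_alt
  rw [pvRowsA_eq]
  simp
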